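-- pv_equiv track=rewrite | github.com/mcarlisle/oblique | oblique.py | rewrite_string
-- ===== SOURCE A (Python) =====
-- import string
--
-- ALLOWED_CHARS = string.ascii_letters + string.punctuation
--
-- def rewrite_string(s_in, split=False, words_before_line_break = 3):
--     # Input:  a string
--     # Output: a string
-- ###    # Output: a list of shorter strings
--
--     # cut off last char if bad
--     if s_in[-1] not in ALLOWED_CHARS:
--         s_in = s_in[:-1]
--     # split into words
--     s_split = s_in.split(' ')
--
--     s = u''
--     i = 0
--     for w in s_split:
--         s += w + u' '
--         i += 1
--         if i == words_before_line_break or s[0] == '-':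
--             s += u'\n'
--             i = 0
--     if i > 0:
--         s += u'\n'
--
--     if split:
--         return s.split('\n')
--     else:
--         return s
-- ===== SOURCE B (Python) =====
-- import string
--
-- ALLOWED_CHARS = string.ascii_letters + string.punctuation
--
-- def rewrite_string(s_in, split=False, words_before_line_break=3):
--     # Chunk-slicing reimplementation: take/drop blocks of k words instead of a per-word counter.
--     if s_in[-1] not in ALLOWED_CHARS:
--         s_in = s_in[:-1]
--     words = s_in.split(' ')
--     k = 1 if words[0].startswith('-') else words_before_line_break
--     if k <= 0:
--         k = len(words)  # no break ever fires: the whole list is one chunk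
--     s = ''
--     while words:
--         chunk, words = words[:k], words[k:]
--         s += ''.join(w + ' ' for w in chunk) + '\n'
--     return s.split('\n') if split else s
-- ===== Notes on version B (the rewrite author's own statement) =====
-- stated objective: alternative
-- what changed: A builds the string word by word with a running counter that triggers line breaks; B first computes the effective chunk size k (1 for dash-led text, the whole list when k<=0) and then peels the word list into consecutive k-word chunks, rendering each chunk followed by one newline.
-- outside the precondition, e.g. on rewrite_string('ab cd ef', True, 3): A returns ['ab cd ef ', ''], B returns ['ab cd ef ', '']; on rewrite_string('', False, 3): A raises IndexError, B raises IndexError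
import Mathlib
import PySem

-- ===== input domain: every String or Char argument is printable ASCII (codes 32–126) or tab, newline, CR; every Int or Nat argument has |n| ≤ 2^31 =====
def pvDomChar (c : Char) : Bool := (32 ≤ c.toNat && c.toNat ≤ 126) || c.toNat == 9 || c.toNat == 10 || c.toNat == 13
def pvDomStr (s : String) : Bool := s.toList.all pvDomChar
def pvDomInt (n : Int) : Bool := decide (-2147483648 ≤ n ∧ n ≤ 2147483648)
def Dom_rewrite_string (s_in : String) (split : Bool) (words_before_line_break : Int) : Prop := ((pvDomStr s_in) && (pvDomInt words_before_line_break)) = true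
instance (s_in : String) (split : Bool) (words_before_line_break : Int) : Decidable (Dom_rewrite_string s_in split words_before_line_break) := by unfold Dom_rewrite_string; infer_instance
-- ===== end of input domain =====

-- B replaces A's per-word counter loop by slicing the word list into consecutive k-word
-- chunks (k = 1 for dash-led text, the whole list when k <= 0); same output, same cost.

-- ===== PORT A =====
-- ALLOWED_CHARS = string.ascii_letters + string.punctuation
def pvAllowedChars : List Char :=
  "abcdefghijklmnopqrstuvwxyzABCDEFGHIJKLMNOPQRSTUVWXYZ!\"#$%&'()*+,-./:;<=>?@[\\]^_`{|}~".toList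

-- the for-loop of A over the split words, state (s, i)
def pvFoldA (wblb : Int) (st : List Char × Int) (ws : List (List Char)) : List Char × Int :=
  ws.foldl (fun si w =>
    let s := si.1 ++ w ++ [' ']
    let i := si.2 + 1
    if i == wblb || s.head? == some '-' then (s ++ ['\n'], 0) else (s, i)) st

def rewrite_string (s_in : String) (split : Bool) (words_before_line_break : Int) : String :=
  let cs0 := s_in.toList
  -- 'if s_in[-1] not in ALLOWED_CHARS: s_in = s_in[:-1]' ; s_in[-1] raises IndexError on "" (excluded by Pre_)
  let cs := match PySem.List.pyGet? cs0 (-1) with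
    | none => cs0
    | some c => if pvAllowedChars.contains c then cs0 else PySem.List.slice cs0 none (some (-1))
  let s_split := PySem.Chars.splitOn cs [' ']
  let r := pvFoldA words_before_line_break ([], 0) s_split
  let s := if r.2 > 0 then r.1 ++ ['\n'] else r.1
  -- with split=True Python returns s.split('\n'), a list of str (not a str): excluded by Pre_
  if split then String.ofList s else String.ofList s

-- ===== PORT B =====
-- ''.join(w + ' ' for w in chunk)
def pvRenderChunk (c : List (List Char)) : List Char := (c.map (fun w => w ++ [' '])).flatten

-- the while-loop of B: peel words[:k], words[k:] (cons pattern keeps the recursion structural; B only calls it with k >= 1)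
def pvChunkLoop (k : Nat) : List (List Char) → List Char → List Char
  | [], s => s
  | w :: rest, s => pvChunkLoop k (rest.drop (k-1)) (s ++ pvRenderChunk (w :: rest.take (k-1)) ++ ['\n'])
termination_by ws => ws.length
decreasing_by simp [List.length_drop]

def rewrite_string_alt (s_in : String) (split : Bool) (words_before_line_break : Int) : String :=
  let cs0 := s_in.toList
  let cs := match PySem.List.pyGet? cs0 (-1) with
    | none => cs0
    | some c => if pvAllowedChars.contains c then cs0 else PySem.List.slice cs0 none (some (-1))
  let words := PySem.Chars.splitOn cs [' ']
  -- k = 1 if words[0].startswith('-') else words_before_line_break  (split(' ') is never empty, so headD is words[0])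
  let k0 : Int := if PySem.Chars.startswith (words.headD []) ['-'] then 1 else words_before_line_break
  let kN : Nat := if k0 ≤ 0 then words.length else k0.toNat
  let s := pvChunkLoop kN words []
  if split then String.ofList s else String.ofList s

-- ===== PRECONDITION & SPEC =====
-- Pre_ excludes (a) s_in = "", where A raises IndexError, and (b) split = true, where A
-- returns a list of strings, not a value of the declared return type str.
def Pre_rewrite_string (s_in : String) (split : Bool) (words_before_line_break : Int) : Prop :=
  s_in ≠ "" ∧ split = false
instance (s_in : String) (split : Bool) (words_before_line_break : Int) : Decidable (Pre_rewrite_string s_in split words_before_line_break) := by unfold Pre_rewrite_string; infer_instance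
def pvWitness_rewrite_string : String × Bool × Int := ("ab cd ef", false, 2)

def Spec_rewrite_string (s_in : String) (split : Bool) (words_before_line_break : Int) (out : String) : Prop := out = rewrite_string_alt s_in split words_before_line_break
instance (s_in : String) (split : Bool) (words_before_line_break : Int) (out : String) : Decidable (Spec_rewrite_string s_in split words_before_line_break out) := by unfold Spec_rewrite_string; infer_instance

-- ===== CLAIM (what is proved, stated in full; the proofs are below) =====
def Claim_equal_rewrite_string : Prop := ∀ (s_in : String) (split : Bool) (words_before_line_break : Int), Dom_rewrite_string s_in split words_before_line_break → Pre_rewrite_string s_in split words_before_line_break → Spec_rewrite_string s_in split words_before_line_break (rewrite_string s_in split words_before_line_break)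

-- ===== LEMMAS AND PROOFS =====

def pvFoldG (wblb : Int) (db : Bool) (st : List Char × Int) (ws : List (List Char)) : List Char × Int :=
  ws.foldl (fun si w =>
    let s := si.1 ++ w ++ [' ']
    let i := si.2 + 1
    if i == wblb || db then (s ++ ['\n'], 0) else (s, i)) st

def pvJ (ws : List (List Char)) : List Char := (ws.map (fun w => w ++ [' '])).flatten

theorem pvFoldA_eq_G (wblb : Int) (ws : List (List Char)) (s : List Char) (i : Int) (hs : s ≠ []) :
    pvFoldA wblb (s, i) ws = pvFoldG wblb (s.head? == some '-') (s, i) ws := by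
  induction ws generalizing s i with
  | nil => rfl
  | cons w ws ih =>
    obtain ⟨a, as, rfl⟩ : ∃ a as, s = a :: as := by
      cases s with
      | nil => exact absurd rfl hs
      | cons a as => exact ⟨a, as, rfl⟩
    simp only [pvFoldA, pvFoldG, List.foldl_cons] at *
    have h1 : ((a :: as) ++ w ++ [' ']).head? = some a := by simp
    rw [h1]
    simp only [List.head?_cons]
    split
    · exact ih _ _ (by simp)
    · exact ih _ _ (by simp)
theorem pvHead_dash (w : List Char) :
    ((w ++ [' ']).head? == some '-') = PySem.Chars.startswith w ['-'] := by
  cases w with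
  | nil => simp [PySem.Chars.startswith]
  | cons c cs =>
    simp only [List.cons_append, List.head?_cons]
    cases hb : PySem.Chars.startswith (c :: cs) ['-'] with
    | true =>
      have hc : c = '-' := by
        rcases (PySem.Chars.startswith_iff _ _).mp hb with ⟨t, ht⟩
        simpa using congrArg List.head? ht.symm
      simp [hc]
    | false =>
      have hc : c ≠ '-' := by
        intro hc
        have : PySem.Chars.startswith (c :: cs) ['-'] = true :=
          (PySem.Chars.startswith_iff _ _).mpr (by simp [hc])
        rw [this] at hb; cases hb
      simp [hc]

theorem pvFoldG_true (wblb : Int) (ws : List (List Char)) (s : List Char) (i : Int) (hw : ws ≠ []) :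
    pvFoldG wblb true (s, i) ws = (s ++ (ws.map (fun w => w ++ [' ', '\n'])).flatten, 0) := by
  induction ws generalizing s i with
  | nil => exact absurd rfl hw
  | cons w ws ih =>
    simp only [pvFoldG, List.foldl_cons, Bool.or_true, if_true] at *
    cases ws with
    | nil => simp
    | cons w' ws' => rw [ih _ _ (by simp)]; simp
theorem pvFoldG_nonpos (wblb : Int) (hw : wblb ≤ 0) (ws : List (List Char)) (s : List Char) (i : Int) (hi : 0 ≤ i) :
    pvFoldG wblb false (s, i) ws = (s ++ pvJ ws, i + ws.length) := by
  induction ws generalizing s i with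
  | nil => simp [pvFoldG, pvJ]
  | cons w ws ih =>
    simp only [pvFoldG, List.foldl_cons, Bool.or_false] at *
    have hcond : (i + 1 == wblb) = false := by simp; omega
    rw [if_neg (by rw [hcond]; exact Bool.false_ne_true)]
    rw [ih _ _ (by omega)]
    simp only [Prod.mk.injEq, pvJ, List.map_cons, List.flatten_cons, List.length_cons]
    constructor
    · simp [List.append_assoc]
    · push_cast; ring

theorem pvFoldG_seg (wblb : Int) (ws : List (List Char)) (s : List Char) (i : Int)
    (hi : 0 ≤ i) (hle : i + ws.length ≤ wblb) :
    pvFoldG wblb false (s, i) ws =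
      if i + ws.length = wblb ∧ ws ≠ [] then (s ++ pvJ ws ++ ['\n'], 0)
      else (s ++ pvJ ws, i + ws.length) := by
  induction ws generalizing s i with
  | nil => simp [pvFoldG, pvJ]
  | cons w ws ih =>
    simp only [pvFoldG, List.foldl_cons, Bool.or_false] at *
    by_cases hc : i + 1 = wblb
    · have hws : ws = [] := by
        cases ws with
        | nil => rfl
        | cons a b => exfalso; simp only [List.length_cons] at hle; push_cast at hle; omega
      subst hws
      have hb : (i + 1 == wblb) = true := by simp [hc]
      rw [if_pos hb]
      show (_, _) = _
      have hif : (i + ([w] : List (List Char)).length = wblb ∧ ([w] : List (List Char)) ≠ []) := by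
        refine ⟨?_, by simp⟩
        simp only [List.length_cons, List.length_nil]; push_cast; omega
      rw [if_pos hif]
      simp [pvJ, List.append_assoc]
    · have hb : (i + 1 == wblb) = false := by simp [hc]
      rw [if_neg (by rw [hb]; exact Bool.false_ne_true)]
      rw [ih _ _ (by omega) (by simp only [List.length_cons] at hle; push_cast at hle ⊢; omega)]
      by_cases hfull : i + 1 + ws.length = wblb ∧ ws ≠ []
      · rw [if_pos hfull, if_pos ?side]
        case side =>
          refine ⟨?_, by simp⟩
          simp only [List.length_cons]; push_cast; omega
        simp [pvJ, List.append_assoc]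
      · rw [if_neg hfull, if_neg ?side2]
        case side2 =>
          rintro ⟨h1, -⟩
          simp only [List.length_cons] at h1
          apply hfull
          constructor
          · push_cast at h1 ⊢; omega
          · intro hws
            subst hws
            simp only [List.length_nil] at h1
            push_cast at h1; omega
        simp only [Prod.mk.injEq, pvJ, List.map_cons, List.flatten_cons, List.length_cons]
        constructor
        · simp [List.append_assoc]
        · push_cast; ring
theorem pvChunkLoop_one (ws : List (List Char)) (s : List Char) :
    pvChunkLoop 1 ws s = s ++ (ws.map (fun w => w ++ [' ', '\n'])).flatten := by
  induction ws generalizing s with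
  | nil => simp [pvChunkLoop]
  | cons w rest ih =>
    rw [pvChunkLoop]
    simp only [Nat.sub_self, List.drop_zero, List.take_zero]
    rw [ih]
    simp [pvRenderChunk, List.append_assoc]

theorem pvChunkLoop_all (ws : List (List Char)) (s : List Char) (hw : ws ≠ []) :
    pvChunkLoop ws.length ws s = s ++ pvJ ws ++ ['\n'] := by
  cases ws with
  | nil => exact absurd rfl hw
  | cons w rest =>
    rw [pvChunkLoop]
    simp only [List.length_cons, Nat.add_sub_cancel]
    rw [List.take_length, List.drop_length]
    rw [pvChunkLoop]
    simp [pvRenderChunk, pvJ, List.append_assoc]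

theorem pvChunk_main (wblb : Int) (hw : 1 ≤ wblb) (ws : List (List Char)) (s : List Char) :
    (let r := pvFoldG wblb false (s, 0) ws; if r.2 > 0 then r.1 ++ ['\n'] else r.1) =
      pvChunkLoop wblb.toNat ws s := by
  cases ws with
  | nil => simp [pvFoldG, pvChunkLoop]
  | cons w rest =>
    obtain ⟨k, hkw⟩ : ∃ k : Nat, wblb = (k : Int) :=
      ⟨wblb.toNat, (Int.toNat_of_nonneg (by omega)).symm⟩
    subst hkw
    rw [Int.toNat_natCast]
    have hk1 : 1 ≤ k := by exact_mod_cast hw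
    by_cases hlen : (w :: rest).length ≤ k
    · have htake : rest.take (k-1) = rest := List.take_of_length_le (by simp at hlen; omega)
      have hdrop : rest.drop (k-1) = [] := List.drop_eq_nil_of_le (by simp at hlen; omega)
      rw [pvFoldG_seg ((k : Int)) (w :: rest) s 0 le_rfl (by omega)]
      rw [pvChunkLoop, htake, hdrop, pvChunkLoop]
      by_cases hfull : (0 : Int) + ((w :: rest).length : Int) = (k : Int)
      · have hcond : (0 : Int) + ((w :: rest).length : Int) = (k : Int) ∧ w :: rest ≠ [] :=
          ⟨hfull, by simp⟩
        rw [if_pos hcond]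
        norm_num [pvJ, pvRenderChunk]
      · have hno : ¬((0 : Int) + ((w :: rest).length : Int) = (k : Int) ∧ w :: rest ≠ []) :=
          fun h => hfull h.1
        rw [if_neg hno]
        norm_num [pvJ, pvRenderChunk]
    · rw [not_le] at hlen
      have hsplit : (w :: rest) = (w :: rest).take k ++ (w :: rest).drop k :=
        (List.take_append_drop k (w :: rest)).symm
      conv_lhs => rw [hsplit]
      rw [show pvFoldG ((k : Int)) false (s, 0) ((w :: rest).take k ++ (w :: rest).drop k)
            = pvFoldG ((k : Int)) false (pvFoldG ((k : Int)) false (s, 0) ((w :: rest).take k)) ((w :: rest).drop k)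
          from List.foldl_append]
      have hlt : (((w :: rest).take k).length : Int) = (k : Int) := by
        rw [List.length_take]
        have : min k (w :: rest).length = k := by omega
        rw [this]
      rw [pvFoldG_seg ((k : Int)) ((w :: rest).take k) s 0 le_rfl (by omega)]
      have hcond : (0 : Int) + (((w :: rest).take k).length : Int) = (k : Int) ∧ (w :: rest).take k ≠ [] := by
        refine ⟨by omega, ?_⟩
        apply List.ne_nil_of_length_pos
        rw [List.length_take]
        omega
      rw [if_pos hcond]
      have hrec := pvChunk_main ((k : Int)) hw ((w :: rest).drop k) (s ++ pvJ ((w :: rest).take k) ++ ['\n'])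
      rw [Int.toNat_natCast] at hrec
      rw [hrec]
      rw [pvChunkLoop]
      obtain ⟨k', rfl⟩ : ∃ k', k = k' + 1 := ⟨k - 1, by omega⟩
      simp only [List.drop_succ_cons, List.take_succ_cons, Nat.add_sub_cancel]
      congr 2
termination_by ws.length
decreasing_by simp; omega

theorem pvHead_left (l l' : List Char) (h : l ≠ []) : (l ++ l').head? = l.head? := by
  cases l with
  | nil => exact absurd rfl h
  | cons a as => rfl

theorem pv_core (wblb : Int) (words : List (List Char)) :
    (let r := pvFoldA wblb ([], 0) words; if r.2 > 0 then r.1 ++ ['\n'] else r.1) =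
      (let k0 : Int := if PySem.Chars.startswith (words.headD []) ['-'] then 1 else wblb
       let kN : Nat := if k0 ≤ 0 then words.length else k0.toNat
       pvChunkLoop kN words []) := by
  cases words with
  | nil => simp [pvFoldA, pvChunkLoop]
  | cons w ws =>
    have hh := pvHead_dash w
    have hA : pvFoldA wblb ([], 0) (w :: ws)
        = pvFoldG wblb (PySem.Chars.startswith w ['-']) ([], 0) (w :: ws) := by
      simp only [pvFoldA, pvFoldG, List.foldl_cons, List.nil_append]
      rw [hh]
      by_cases hc : ((0 : Int) + 1 == wblb || PySem.Chars.startswith w ['-']) = true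
      · rw [hc]
        simp only [if_true]
        have := pvFoldA_eq_G wblb ws (w ++ [' '] ++ ['\n']) 0 (by simp)
        simp only [pvFoldA, pvFoldG] at this
        rw [this, pvHead_left (w ++ [' ']) ['\n'] (by simp), hh]
      · rw [Bool.not_eq_true] at hc
        rw [if_neg (by rw [hc]; exact Bool.false_ne_true)]
        have := pvFoldA_eq_G wblb ws (w ++ [' ']) (0 + 1) (by simp)
        simp only [pvFoldA, pvFoldG] at this
        rw [this, hh]
    simp only [List.headD_cons]
    rcases Bool.eq_false_or_eq_true (PySem.Chars.startswith w ['-']) with hd | hd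
    · -- dash: chunk size 1
      rw [hd] at hA
      simp only [hd, if_true]
      rw [if_neg (show ¬((1 : Int) ≤ 0) by norm_num)]
      show (let r := pvFoldA wblb ([], 0) (w :: ws); if r.2 > 0 then r.1 ++ ['\n'] else r.1)
          = pvChunkLoop (1 : Int).toNat (w :: ws) []
      rw [hA, pvFoldG_true wblb (w :: ws) [] 0 (by simp)]
      norm_num [pvChunkLoop_one]
    · -- no dash: chunk size is words_before_line_break
      rw [hd] at hA
      simp only [hd, Bool.false_eq_true, if_false]
      by_cases hw : wblb ≤ 0
      · rw [if_pos hw]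
        show (let r := pvFoldA wblb ([], 0) (w :: ws); if r.2 > 0 then r.1 ++ ['\n'] else r.1)
            = pvChunkLoop (w :: ws).length (w :: ws) []
        rw [hA, pvFoldG_nonpos wblb hw (w :: ws) [] 0 le_rfl]
        rw [pvChunkLoop_all (w :: ws) [] (by simp)]
        simp
      · rw [if_neg hw]
        show (let r := pvFoldA wblb ([], 0) (w :: ws); if r.2 > 0 then r.1 ++ ['\n'] else r.1)
            = pvChunkLoop wblb.toNat (w :: ws) []
        rw [hA]
        exact pvChunk_main wblb (by omega) (w :: ws) []

-- ===== VERDICT (by name: the statement is the Claim_ definition above) =====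
theorem rewrite_string_spec : Claim_equal_rewrite_string := by
  intro s_in split wblb _ _
  show rewrite_string s_in split wblb = rewrite_string_alt s_in split wblb
  unfold rewrite_string rewrite_string_alt
  simp only [ite_self]
  exact congrArg String.ofList (pv_core wblb _)
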